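-- pv_equiv track=rewrite | github.com/schizoleo/-python-programs | Lamps to Illuminate.py | lamps
-- ===== SOURCE A (Python) =====
-- def lamps(S):
--     count = 0
--     for i in range(1,len(S)-1):
--         if(S[i-1]=='.' and S[i]=='.' and S[i+1]=='.'):
--             count=count+1
--         if(S[i]=='.' and S[i-1]=='.' and S[i+1]=='*' and i==1):
--             count = count+1
--         if(S[i]=='.' and S[i-1]=='*' and S[i+1]=='.' and i==len(S)-2):
--             count = count+1
--
--     return(count)
-- ===== SOURCE B (Python) =====
-- def lamps(S):
--     total = 0
--     run = 0
--     for c in S: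
--         if c == '.':
--             run += 1
--             if run >= 3:
--                 total += 1
--         else:
--             run = 0
--     if len(S) >= 3 and S[:3] == '..*':
--         total += 1
--     if len(S) >= 3 and S[-3:] == '*..':
--         total += 1
--     return total
-- ===== Notes on version B (the rewrite author's own statement) =====
-- stated objective: simpler
-- what changed: Replaces the per-index three-character window test (with its i==1 and i==len-2 special cases) by a single run-length scan that adds 1 each time a dot run reaches length 3, plus two direct prefix/suffix comparisons for the boundary bonuses.
import Mathlib
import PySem

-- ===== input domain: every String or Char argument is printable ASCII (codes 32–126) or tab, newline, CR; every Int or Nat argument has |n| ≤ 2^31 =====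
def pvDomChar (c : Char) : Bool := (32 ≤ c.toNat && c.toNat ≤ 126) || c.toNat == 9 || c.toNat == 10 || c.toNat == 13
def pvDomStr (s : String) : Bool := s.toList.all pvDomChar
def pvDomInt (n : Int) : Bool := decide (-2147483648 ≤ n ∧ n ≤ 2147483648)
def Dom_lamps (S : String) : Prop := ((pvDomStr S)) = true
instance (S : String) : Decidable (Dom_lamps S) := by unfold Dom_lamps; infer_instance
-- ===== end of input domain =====

-- B replaces A's per-index three-character window test (with its i==1 / i==len-2 special
-- cases) by a run-length scan plus two direct prefix/suffix checks; same O(n) cost, simpler shape.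

-- ===== PORT A =====
-- literal transliteration: for i in range(1, len(S)-1), three sequential ifs on S[i-1], S[i], S[i+1]
def lamps (S : String) : Int :=
  (PySem.List.pyRange 1 (PySem.Str.len S - 1) 1).foldl (fun count i =>
    let count := if PySem.Str.pyGet? S (i-1) = some '.' ∧ PySem.Str.pyGet? S i = some '.' ∧
                    PySem.Str.pyGet? S (i+1) = some '.' then count + 1 else count
    let count := if PySem.Str.pyGet? S i = some '.' ∧ PySem.Str.pyGet? S (i-1) = some '.' ∧
                    PySem.Str.pyGet? S (i+1) = some '*' ∧ i = 1 then count + 1 else count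
    let count := if PySem.Str.pyGet? S i = some '.' ∧ PySem.Str.pyGet? S (i-1) = some '*' ∧
                    PySem.Str.pyGet? S (i+1) = some '.' ∧ i = PySem.Str.len S - 2 then count + 1 else count
    count) 0

-- ===== PORT B =====
-- one step of Source B's run-length loop: state = (run, total)
def lampsStep (st : Int × Int) (c : Char) : Int × Int :=
  if c = '.' then
    let run := st.1 + 1
    (run, if run ≥ 3 then st.2 + 1 else st.2)
  else (0, st.2)

def lamps_alt (S : String) : Int :=
  let p := S.toList.foldl lampsStep (0, 0)
  let total := p.2
  let total := if PySem.Str.len S ≥ 3 ∧ PySem.Str.slice S none (some 3) = "..*" then total + 1 else total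
  let total := if PySem.Str.len S ≥ 3 ∧ PySem.Str.slice S (some (-3)) none = "*.." then total + 1 else total
  total

-- ===== PRECONDITION & SPEC =====
def Spec_lamps (S : String) (out : Int) : Prop := out = lamps_alt S
instance (S : String) (out : Int) : Decidable (Spec_lamps S out) := by unfold Spec_lamps; infer_instance

-- ===== CLAIM (what is proved, stated in full; the proofs are below) =====
def Claim_equal_lamps : Prop := ∀ (S : String), Dom_lamps S → Spec_lamps S (lamps S)

-- ===== LEMMAS AND PROOFS =====

/-- the number of all-dot windows of length 3, by structural recursion -/
def W : List Char → Int
  | a :: b :: c :: r => (if a = '.' ∧ b = '.' ∧ c = '.' then (1:Int) else 0) + W (b :: c :: r)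
  | _ => 0

theorem W_short (l : List Char) (h : l.length ≤ 2) : W l = 0 := by
  match l with
  | [] => rfl
  | [_] => rfl
  | [_, _] => rfl
  | _ :: _ :: _ :: _ => simp at h

theorem W_cons (a : Char) (t : List Char) :
    W (a :: t) = (if a = '.' ∧ t[0]? = some '.' ∧ t[1]? = some '.' then (1:Int) else 0) + W t := by
  match t with
  | [] => simp [W]
  | [b] => simp [W]
  | b :: c :: r => simp [W]

theorem take3_iff (t : List Char) (x y z : Char) :
    t.take 3 = [x, y, z] ↔ t[0]? = some x ∧ t[1]? = some y ∧ t[2]? = some z := by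
  match t with
  | [] => simp
  | [a] => simp
  | [a, b] => simp
  | a :: b :: c :: r => simp [List.take]

theorem drop3_iff (l : List Char) (h3 : 3 ≤ l.length) (x y z : Char) :
    l.drop (l.length - 3) = [x, y, z] ↔
      l[l.length-3]? = some x ∧ l[l.length-2]? = some y ∧ l[l.length-1]? = some z := by
  obtain ⟨a, b, c, habc⟩ := List.length_eq_three.mp
    (show (l.drop (l.length-3)).length = 3 by simp; omega)
  have g0 : l[l.length-3]? = some a := by
    have h := List.getElem?_drop (xs := l) (i := l.length-3) (j := 0)
    rw [habc] at h; simpa using h.symm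
  have g1 : l[l.length-2]? = some b := by
    have h := List.getElem?_drop (xs := l) (i := l.length-3) (j := 1)
    rw [habc] at h
    have e : l.length - 3 + 1 = l.length - 2 := by omega
    rw [e] at h; simpa using h.symm
  have g2 : l[l.length-1]? = some c := by
    have h := List.getElem?_drop (xs := l) (i := l.length-3) (j := 2)
    rw [habc] at h
    have e : l.length - 3 + 2 = l.length - 1 := by omega
    rw [e] at h; simpa using h.symm
  rw [habc, g0, g1, g2]
  simp only [List.cons.injEq, Option.some.injEq, and_true]

/-- invariant of Source B's run-length loop: a pending run of r dots behaves like
    min r 2 literal dots in front of the remaining input -/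
theorem scan_snd (l : List Char) : ∀ (r t : Int), 0 ≤ r →
    (l.foldl lampsStep (r, t)).2 = t + W (List.replicate (min r.toNat 2) '.' ++ l) := by
  induction l with
  | nil =>
    intro r t hr
    have hlen : (List.replicate (min r.toNat 2) '.' ++ ([]:List Char)).length ≤ 2 := by
      simp
    rw [W_short _ hlen]
    simp
  | cons c l ih =>
    intro r t hr
    by_cases hc : c = '.'
    · subst hc
      rw [List.foldl_cons]
      have h1 : lampsStep (r, t) '.' = (r+1, if r+1 ≥ 3 then t+1 else t) := by
        simp [lampsStep]
      rw [h1, ih (r+1) _ (by omega)]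
      have hcase : r = 0 ∨ r = 1 ∨ 2 ≤ r := by omega
      rcases hcase with h | h | h
      · subst h; norm_num
      · subst h
        norm_num [List.replicate]
        rw [show Int.toNat 2 = 2 from by decide]
        simp [List.replicate]
      · have e1 : min (r+1).toNat 2 = 2 := by omega
        have e2 : min r.toNat 2 = 2 := by omega
        rw [e1, e2, if_pos (by omega : r + 1 ≥ 3)]
        have hW : W (List.replicate 2 '.' ++ '.' :: l) = 1 + W (List.replicate 2 '.' ++ l) := by
          simp [List.replicate, W_cons]
        rw [hW]; ring
    · rw [List.foldl_cons]
      have h1 : lampsStep (r, t) c = (0, t) := by simp [lampsStep, hc]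
      rw [h1, ih 0 t le_rfl]
      have hW : W (List.replicate (min r.toNat 2) '.' ++ c :: l) = W (c :: l) := by
        have hm : min r.toNat 2 = 0 ∨ min r.toNat 2 = 1 ∨ min r.toNat 2 = 2 := by omega
        rcases hm with h | h | h <;> rw [h] <;> simp [List.replicate, W_cons, hc]
      have hW2 : W (c :: l) = W l := by rw [W_cons]; simp [hc]
      simp [hW, hW2]

theorem foldl_three_ifs (L : List Int) (p1 p2 p3 : Int → Prop)
    [DecidablePred p1] [DecidablePred p2] [DecidablePred p3] (a : Int) :
    L.foldl (fun count i =>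
      let count := if p1 i then count + 1 else count
      let count := if p2 i then count + 1 else count
      let count := if p3 i then count + 1 else count
      count) a
    = a + (L.map (fun i =>
        (if p1 i then (1:Int) else 0) + (if p2 i then 1 else 0) + (if p3 i then 1 else 0))).sum := by
  induction L generalizing a with
  | nil => simp
  | cons x L ih =>
    rw [List.foldl_cons, List.map_cons, List.sum_cons, ih]
    split_ifs <;> ring

theorem sum_map_add3 (xs : List Int) (f g h : Int → Int) :
    (xs.map (fun x => f x + g x + h x)).sum = (xs.map f).sum + (xs.map g).sum + (xs.map h).sum := by
  induction xs with
  | nil => simp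
  | cons a xs ih => simp only [List.map_cons, List.sum_cons, ih]; ring

theorem sum_single_one (b : Int) (p : Int → Prop) [DecidablePred p]
    (hb : 1 < b) (hp : ∀ i, p i → i = 1) :
    ((PySem.List.pyRange 1 b).map (fun i => if p i then (1:Int) else 0)).sum
      = if p 1 then 1 else 0 := by
  rw [PySem.List.pyRange_one_cons hb, List.map_cons, List.sum_cons,
    show (1:Int) + 1 = 2 from by norm_num]
  have hz : ((PySem.List.pyRange 2 b).map (fun i => if p i then (1:Int) else 0)).sum = 0 := by
    apply List.sum_eq_zero
    intro x hx
    simp only [List.mem_map] at hx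
    obtain ⟨i, hi, rfl⟩ := hx
    rw [PySem.List.mem_pyRange_one] at hi
    rw [if_neg (fun hpi => by have := hp i hpi; omega)]
  rw [hz, add_zero]

theorem sum_single_last (b : Int) (p : Int → Prop) [DecidablePred p]
    (hb : 1 ≤ b - 1) (hp : ∀ i, p i → i = b - 1) :
    ((PySem.List.pyRange 1 b).map (fun i => if p i then (1:Int) else 0)).sum
      = if p (b-1) then 1 else 0 := by
  have hsplit : PySem.List.pyRange 1 b = PySem.List.pyRange 1 (b-1) ++ [b-1] := by
    have h := PySem.List.pyRange_one_succ_right (a := 1) (b := b-1) hb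
    have e : (b-1) + 1 = b := by ring
    rw [e] at h; exact h
  rw [hsplit, List.map_append, List.sum_append]
  have hz : ((PySem.List.pyRange 1 (b-1)).map (fun i => if p i then (1:Int) else 0)).sum = 0 := by
    apply List.sum_eq_zero
    intro x hx
    simp only [List.mem_map] at hx
    obtain ⟨i, hi, rfl⟩ := hx
    rw [PySem.List.mem_pyRange_one] at hi
    rw [if_neg (fun hpi => by have := hp i hpi; omega)]
  rw [hz, zero_add]
  simp

theorem sum_win_aux (l : List Char) :
    ((List.range (l.length - 2)).map (fun k =>
       if l[k]? = some '.' ∧ l[k+1]? = some '.' ∧ l[k+2]? = some '.' then (1:Int) else 0)).sum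
      = W l := by
  induction l with
  | nil => simp [W]
  | cons a t ih =>
    by_cases ht : t.length ≤ 1
    · have h0 : (a :: t).length - 2 = 0 := by simp; omega
      rw [h0, W_short _ (by simp; omega)]
      simp
    · obtain ⟨d, hd⟩ : ∃ d, t.length = d + 2 := ⟨t.length - 2, by omega⟩
      have hlen : (a :: t).length - 2 = d + 1 := by simp [hd]
      rw [hlen, List.range_succ_eq_map, List.map_cons, List.sum_cons, List.map_map]
      have hshift : ((fun k => if (a :: t)[k]? = some '.' ∧ (a :: t)[k+1]? = some '.' ∧
            (a :: t)[k+2]? = some '.' then (1:Int) else 0) ∘ Nat.succ)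
          = (fun k => if t[k]? = some '.' ∧ t[k+1]? = some '.' ∧ t[k+2]? = some '.'
              then (1:Int) else 0) := by
        funext k
        simp [Nat.succ_eq_add_one, List.getElem?_cons_succ]
      rw [hshift]
      have hd' : d = t.length - 2 := by omega
      rw [hd', ih, W_cons]
      simp

theorem sum_win (l : List Char) :
    ((PySem.List.pyRange 1 ((l.length : Int) - 1)).map (fun i =>
       if PySem.List.pyGet? l (i-1) = some '.' ∧ PySem.List.pyGet? l i = some '.' ∧
          PySem.List.pyGet? l (i+1) = some '.' then (1:Int) else 0)).sum = W l := by
  rw [PySem.List.pyRange_one, List.map_map]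
  have h2 : ((l.length : Int) - 1 - 1).toNat = l.length - 2 := by omega
  rw [h2]
  have hfun : ((fun i => if PySem.List.pyGet? l (i-1) = some '.' ∧ PySem.List.pyGet? l i = some '.' ∧
        PySem.List.pyGet? l (i+1) = some '.' then (1:Int) else 0) ∘ (fun k : Nat => (1:Int) + ↑k))
      = (fun k : Nat => if l[k]? = some '.' ∧ l[k+1]? = some '.' ∧ l[k+2]? = some '.'
          then (1:Int) else 0) := by
    funext k
    have e0 : (1:Int) + ↑k - 1 = ((k : Nat) : Int) := by ring
    have e1 : (1:Int) + ↑k = ((k+1 : Nat) : Int) := by push_cast; ring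
    have e2 : (1:Int) + ↑k + 1 = ((k+2 : Nat) : Int) := by push_cast; ring
    simp only [Function.comp_apply]
    rw [e0, e2, e1, PySem.List.pyGet?_natCast, PySem.List.pyGet?_natCast,
      PySem.List.pyGet?_natCast]
  rw [hfun]
  exact sum_win_aux l

theorem str_pyGet_eq (S : String) (i : Int) :
    PySem.Str.pyGet? S i = PySem.List.pyGet? S.toList i := by
  simp [PySem.Str.pyGet?]

theorem lamps_eq (S : String) :
    lamps S = ((PySem.List.pyRange 1 ((S.toList.length : Int) - 1)).map (fun i =>
        (if PySem.List.pyGet? S.toList (i-1) = some '.' ∧ PySem.List.pyGet? S.toList i = some '.' ∧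
            PySem.List.pyGet? S.toList (i+1) = some '.' then (1:Int) else 0)
      + (if PySem.List.pyGet? S.toList i = some '.' ∧ PySem.List.pyGet? S.toList (i-1) = some '.' ∧
            PySem.List.pyGet? S.toList (i+1) = some '*' ∧ i = 1 then (1:Int) else 0)
      + (if PySem.List.pyGet? S.toList i = some '.' ∧ PySem.List.pyGet? S.toList (i-1) = some '*' ∧
            PySem.List.pyGet? S.toList (i+1) = some '.' ∧ i = (S.toList.length : Int) - 2
          then (1:Int) else 0))).sum := by
  have h := foldl_three_ifs (PySem.List.pyRange 1 (PySem.Str.len S - 1) 1)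
    (fun i => PySem.Str.pyGet? S (i-1) = some '.' ∧ PySem.Str.pyGet? S i = some '.' ∧
        PySem.Str.pyGet? S (i+1) = some '.')
    (fun i => PySem.Str.pyGet? S i = some '.' ∧ PySem.Str.pyGet? S (i-1) = some '.' ∧
        PySem.Str.pyGet? S (i+1) = some '*' ∧ i = 1)
    (fun i => PySem.Str.pyGet? S i = some '.' ∧ PySem.Str.pyGet? S (i-1) = some '*' ∧
        PySem.Str.pyGet? S (i+1) = some '.' ∧ i = PySem.Str.len S - 2)
    0
  rw [lamps, h, zero_add]
  simp only [str_pyGet_eq, PySem.Str.len_eq]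

theorem alt_eq (S : String) :
    lamps_alt S =
      W S.toList
      + (if 3 ≤ S.toList.length ∧ S.toList.take 3 = ['.', '.', '*'] then (1:Int) else 0)
      + (if 3 ≤ S.toList.length ∧ S.toList.drop (S.toList.length - 3) = ['*', '.', '.']
          then (1:Int) else 0) := by
  have hscan : (S.toList.foldl lampsStep (0, 0)).2 = W S.toList := by
    rw [scan_snd S.toList 0 0 le_rfl]
    norm_num
  have hs1 : (PySem.Str.slice S none (some 3) = "..*") ↔ S.toList.take 3 = ['.', '.', '*'] := by
    rw [← String.toList_inj]
    have hb : (PySem.Str.slice S none (some 3)).toList = PySem.List.slice S.toList none (some 3) := by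
      simp [PySem.Str.slice]
    rw [hb, PySem.List.slice_to S.toList (by norm_num : (0:Int) ≤ 3),
      show ((3:Int)).toNat = 3 from rfl, show "..*".toList = ['.', '.', '*'] from by decide]
  have hs2 : (PySem.Str.slice S (some (-3)) none = "*..") ↔
      S.toList.drop (S.toList.length - 3) = ['*', '.', '.'] := by
    rw [← String.toList_inj]
    have hb : (PySem.Str.slice S (some (-3)) none).toList = PySem.List.slice S.toList (some (-3)) none := by
      simp [PySem.Str.slice]
    rw [hb, PySem.List.slice_from_neg_ofNat S.toList 3 (by norm_num),
      show "*..".toList = ['*', '.', '.'] from by decide]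
  rw [lamps_alt]
  simp only [hscan, PySem.Str.len_eq, ge_iff_le, hs1, hs2]
  norm_num
  split_ifs <;> ring

-- ===== VERDICT (by name: the statement is the Claim_ definition above) =====
theorem lamps_spec : Claim_equal_lamps := by
  intro S _
  unfold Spec_lamps
  rw [lamps_eq, alt_eq]
  set l := S.toList with hl
  by_cases h3 : 3 ≤ l.length
  · rw [sum_map_add3 _
      (fun i => if PySem.List.pyGet? l (i-1) = some '.' ∧ PySem.List.pyGet? l i = some '.' ∧
          PySem.List.pyGet? l (i+1) = some '.' then (1:Int) else 0)
      (fun i => if PySem.List.pyGet? l i = some '.' ∧ PySem.List.pyGet? l (i-1) = some '.' ∧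
          PySem.List.pyGet? l (i+1) = some '*' ∧ i = 1 then (1:Int) else 0)
      (fun i => if PySem.List.pyGet? l i = some '.' ∧ PySem.List.pyGet? l (i-1) = some '*' ∧
          PySem.List.pyGet? l (i+1) = some '.' ∧ i = (l.length : Int) - 2 then (1:Int) else 0)]
    rw [sum_win l]
    rw [sum_single_one ((l.length : Int) - 1)
      (fun i => PySem.List.pyGet? l i = some '.' ∧ PySem.List.pyGet? l (i-1) = some '.' ∧
          PySem.List.pyGet? l (i+1) = some '*' ∧ i = 1)
      (by omega) (fun i hi => hi.2.2.2)]
    rw [sum_single_last ((l.length : Int) - 1)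
      (fun i => PySem.List.pyGet? l i = some '.' ∧ PySem.List.pyGet? l (i-1) = some '*' ∧
          PySem.List.pyGet? l (i+1) = some '.' ∧ i = (l.length : Int) - 2)
      (by omega) (fun i hi => by have := hi.2.2.2; omega)]
    have c0 : ((0:Nat) : Int) = (0:Int) := by norm_num
    have hhead : (PySem.List.pyGet? l 1 = some '.' ∧ PySem.List.pyGet? l (1-1) = some '.' ∧
        PySem.List.pyGet? l (1+1) = some '*' ∧ (1:Int) = 1) ↔
        (3 ≤ l.length ∧ l.take 3 = ['.', '.', '*']) := by
      have e0 : (1:Int) - 1 = ((0:Nat) : Int) := by norm_num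
      have e1 : (1:Int) = ((1:Nat) : Int) := by norm_num
      have e2 : (1:Int) + 1 = ((2:Nat) : Int) := by norm_num
      rw [take3_iff]
      constructor
      · rintro ⟨ha, hb, hc, -⟩
        rw [e1, PySem.List.pyGet?_natCast] at ha
        rw [e0, PySem.List.pyGet?_natCast] at hb
        rw [e2, PySem.List.pyGet?_natCast] at hc
        refine ⟨?_, hb, ha, hc⟩
        have := List.getElem?_eq_some_iff.mp hc
        omega
      · rintro ⟨hlen, hb, ha, hc⟩
        refine ⟨?_, ?_, ?_, rfl⟩
        · rw [e1, PySem.List.pyGet?_natCast]; exact ha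
        · rw [e0, PySem.List.pyGet?_natCast]; exact hb
        · rw [e2, PySem.List.pyGet?_natCast]; exact hc
    have htail : (PySem.List.pyGet? l ((l.length : Int) - 1 - 1) = some '.' ∧
        PySem.List.pyGet? l ((l.length : Int) - 1 - 1 - 1) = some '*' ∧
        PySem.List.pyGet? l ((l.length : Int) - 1 - 1 + 1) = some '.' ∧
        (l.length : Int) - 1 - 1 = (l.length : Int) - 2) ↔
        (3 ≤ l.length ∧ l.drop (l.length - 3) = ['*', '.', '.']) := by
      have e0 : (l.length : Int) - 1 - 1 - 1 = ((l.length - 3 : Nat) : Int) := by omega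
      have e1 : (l.length : Int) - 1 - 1 = ((l.length - 2 : Nat) : Int) := by omega
      have e2 : (l.length : Int) - 1 - 1 + 1 = ((l.length - 1 : Nat) : Int) := by omega
      rw [drop3_iff l h3]
      constructor
      · rintro ⟨ha, hb, hc, -⟩
        rw [e1, PySem.List.pyGet?_natCast] at ha
        rw [e0, PySem.List.pyGet?_natCast] at hb
        rw [e2, PySem.List.pyGet?_natCast] at hc
        exact ⟨h3, hb, ha, hc⟩
      · rintro ⟨-, hb, ha, hc⟩
        refine ⟨?_, ?_, ?_, by ring⟩
        · rw [e1, PySem.List.pyGet?_natCast]; exact ha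
        · rw [e0, PySem.List.pyGet?_natCast]; exact hb
        · rw [e2, PySem.List.pyGet?_natCast]; exact hc
    rw [if_congr hhead rfl rfl, if_congr htail rfl rfl]
  · have hnil : PySem.List.pyRange 1 ((l.length : Int) - 1) 1 = [] :=
      PySem.List.pyRange_one_eq_nil (by omega)
    rw [hnil]
    rw [W_short l (by omega)]
    rw [if_neg (fun h => h3 h.1), if_neg (fun h => h3 h.1)]
    simp
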